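-- pv_equiv track=rewrite | github.com/George-King-123/WXML-Extremal-Groups | D_infinity/compute_s_n.py | function_simulation
-- ===== SOURCE A (Python) =====
-- def function_simulation(n, k, p):
--   def run_simulation(S, n, k):
--
--     def compute_one_more(cur_tuple, last_fcn_value, S):
--       # either +1 or -1
--       cur_sign = cur_tuple[1]
--
--       # cur_sum is a list of length k indicating, where
--       # cur_sum[i] is the (signed) number of times the ith
--       # elt of S appears in in the sum
--       cur_sum = list(cur_tuple[0])
--       cur_sum[last_fcn_value] += cur_sign
--       cur_sign *= S[last_fcn_value]
--
--       return (tuple(cur_sum), cur_sign)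
--
--     if n == 0:
--       return {(tuple([0] * k), 1)}
--     len_n_minus_one_prods = run_simulation(S, n-1, k)
--     len_n_prods = set()
--     for prod in len_n_minus_one_prods:
--       for i in range(0, k):
--         len_n_prods.add(compute_one_more(prod, i, S))
--     # last fcn_value is f(n) for our current value of n
--
--     return len_n_prods
--
--   S =  [-1] * p + [1] * (k-p)
--   return len(run_simulation(S, n, k))
-- ===== SOURCE B (Python) =====
-- def function_simulation(n, k, p):
--     S = [-1] * p + [1] * (k - p)
--     cur = {((0,) * k, 1)}
--     for _ in range(n):
--         cur = {(t[:i] + (t[i] + s,) + t[i + 1:], s * S[i])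
--                for (t, s) in cur for i in range(k)}
--     return len(cur)
-- ===== Notes on version B (the rewrite author's own statement) =====
-- stated objective: simpler
-- what changed: Replaces A's n-deep recursion with helper closures by a flat bottom-up loop: one set comprehension per step that builds each successor tuple by slicing instead of list-copy-and-mutate.
import Mathlib
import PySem

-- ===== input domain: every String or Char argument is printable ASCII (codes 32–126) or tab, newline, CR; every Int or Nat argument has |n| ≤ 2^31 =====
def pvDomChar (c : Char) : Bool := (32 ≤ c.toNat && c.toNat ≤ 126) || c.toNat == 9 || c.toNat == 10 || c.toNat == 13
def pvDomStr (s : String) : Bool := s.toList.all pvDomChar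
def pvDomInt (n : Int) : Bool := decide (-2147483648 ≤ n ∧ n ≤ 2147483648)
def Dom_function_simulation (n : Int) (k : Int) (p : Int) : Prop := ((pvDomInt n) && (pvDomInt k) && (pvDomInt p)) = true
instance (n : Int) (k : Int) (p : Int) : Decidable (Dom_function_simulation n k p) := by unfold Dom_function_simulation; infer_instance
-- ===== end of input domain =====

-- B replaces A's n-deep recursion (with helper closures and list copy/mutate) by a flat
-- bottom-up loop whose set comprehension builds successor tuples by slicing; same cost,
-- simpler shape. Equivalence proved for 0 ≤ n (A recurses without base case for n < 0).


-- ===== PORT A =====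
-- compute_one_more: indices come from range(0, k) and are always in range, so the
-- total forms pySetD/pyGetD are exact here.
def pvComputeOneMore (curTuple : List Int × Int) (lastFcnValue : Int) (S : List Int) :
    List Int × Int :=
  let curSign := curTuple.2
  let curSum := curTuple.1
  let curSum' := PySem.List.pySetD curSum lastFcnValue
      (PySem.List.pyGetD curSum lastFcnValue 0 + curSign)
  let curSign' := curSign * PySem.List.pyGetD S lastFcnValue 0
  (curSum', curSign')

-- run_simulation, recursion on the (nonnegative) counter n
def pvRunSimulation (S : List Int) (n : Nat) (k : Int) : PySem.Set (List Int × Int) :=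
  match n with
  | 0 => PySem.Set.add PySem.Set.empty (List.replicate k.toNat 0, 1)
  | m + 1 =>
      let prev := pvRunSimulation S m k
      prev.foldl (fun acc prod =>
        (PySem.List.pyRange 0 k 1).foldl
          (fun acc2 i => PySem.Set.add acc2 (pvComputeOneMore prod i S)) acc)
        PySem.Set.empty

-- n.toNat is exact for 0 ≤ n (Pre_); for n < 0 Python A raises RecursionError.
def function_simulation (n : Int) (k : Int) (p : Int) : Int :=
  let S := List.replicate p.toNat (-1) ++ List.replicate (k - p).toNat 1
  PySem.Set.len (pvRunSimulation S n.toNat k)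

-- ===== PORT B =====
-- one pass of B's set comprehension: {(t[:i] + (t[i]+s,) + t[i+1:], s*S[i]) ...}
def pvStepAlt (S : List Int) (k : Int) (cur : PySem.Set (List Int × Int)) :
    PySem.Set (List Int × Int) :=
  PySem.Set.ofList (cur.flatMap (fun ts =>
    (PySem.List.pyRange 0 k 1).map (fun i =>
      (PySem.List.slice ts.1 none (some i)
         ++ [PySem.List.pyGetD ts.1 i 0 + ts.2]
         ++ PySem.List.slice ts.1 (some (i + 1)) none,
       ts.2 * PySem.List.pyGetD S i 0))))

def function_simulation_alt (n : Int) (k : Int) (p : Int) : Int :=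
  let S := List.replicate p.toNat (-1) ++ List.replicate (k - p).toNat 1
  let cur : PySem.Set (List Int × Int) :=
    PySem.Set.add PySem.Set.empty (List.replicate k.toNat 0, 1)
  PySem.Set.len ((PySem.List.pyRange 0 n 1).foldl (fun c _ => pvStepAlt S k c) cur)

-- ===== PRECONDITION & SPEC =====
-- For n < 0 A's recursion never reaches its base case and raises RecursionError.
def Pre_function_simulation (n : Int) (k : Int) (p : Int) : Prop := 0 ≤ n
instance (n : Int) (k : Int) (p : Int) : Decidable (Pre_function_simulation n k p) := by
  unfold Pre_function_simulation; infer_instance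
def pvWitness_function_simulation : Int × Int × Int := (2, 2, 1)

def Spec_function_simulation (n : Int) (k : Int) (p : Int) (out : Int) : Prop :=
  out = function_simulation_alt n k p
instance (n : Int) (k : Int) (p : Int) (out : Int) : Decidable (Spec_function_simulation n k p out) := by
  unfold Spec_function_simulation; infer_instance

-- ===== CLAIM (what is proved, stated in full; the proofs are below) =====
def Claim_equal_function_simulation : Prop := ∀ (n : Int) (k : Int) (p : Int), Dom_function_simulation n k p → Pre_function_simulation n k p → Spec_function_simulation n k p (function_simulation n k p)

-- ===== LEMMAS AND PROOFS =====

theorem pv_mem_foldl_add {a b : Type} [BEq a] [LawfulBEq a] (l : List b) (f : b -> a)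
    (init : PySem.Set a) (x : a)
    (hx : x ∈ l.foldl (fun acc y => PySem.Set.add acc (f y)) init) :
    x ∈ init ∨ ∃ y ∈ l, x = f y := by
  induction l generalizing init with
  | nil => exact Or.inl hx
  | cons a t ih =>
      rcases ih _ hx with h | h
      · rcases (PySem.Set.mem_add _ _ _).1 h with h' | h'
        · exact Or.inl h'
        · exact Or.inr ⟨a, by simp, h'⟩
      · rcases h with ⟨y, hy, rfl⟩
        exact Or.inr ⟨y, by simp [hy], rfl⟩

theorem pv_mem_nested {b : Type} (cur : List b) (k : Int)
    (f : b -> Int -> List Int × Int) (init : PySem.Set (List Int × Int))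
    (x : List Int × Int)
    (hx : x ∈ cur.foldl (fun acc prod =>
        (PySem.List.pyRange 0 k 1).foldl
          (fun acc2 i => PySem.Set.add acc2 (f prod i)) acc) init) :
    x ∈ init ∨ ∃ prod ∈ cur, ∃ i ∈ PySem.List.pyRange 0 k 1, x = f prod i := by
  induction cur generalizing init with
  | nil => exact Or.inl hx
  | cons a t ih =>
      rcases ih _ hx with h | h
      · rcases pv_mem_foldl_add (PySem.List.pyRange 0 k 1) (f a) init x h with h' | h'
        · exact Or.inl h'
        · rcases h' with ⟨i, hi, rfl⟩
          exact Or.inr ⟨a, by simp, i, hi, rfl⟩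
      · rcases h with ⟨prod, hp, i, hi, rfl⟩
        exact Or.inr ⟨prod, by simp [hp], i, hi, rfl⟩

-- every element reachable after m steps carries a sum tuple of length k.toNat
theorem pv_invariant (S : List Int) (k : Int) (m : Nat) :
    ∀ x ∈ pvRunSimulation S m k, x.1.length = k.toNat := by
  induction m with
  | zero =>
      intro x hx
      simp [pvRunSimulation, PySem.Set.add, PySem.Set.empty, PySem.Set.contains] at hx
      simp [hx]
  | succ m ih =>
      intro x hx
      simp only [pvRunSimulation] at hx
      rcases pv_mem_nested (pvRunSimulation S m k) k
          (fun prod i => pvComputeOneMore prod i S) PySem.Set.empty x hx with h | h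
      · exact absurd h (by simp [PySem.Set.empty])
      · rcases h with ⟨prod, hprod, i, _, rfl⟩
        simpa [pvComputeOneMore, PySem.List.length_pySetD] using ih prod hprod

theorem pv_elem_eq (S : List Int) (t : List Int) (s i : Int)
    (h0 : 0 ≤ i) (hik : i < (t.length : Int)) :
    (PySem.List.slice t none (some i) ++ [PySem.List.pyGetD t i 0 + s]
        ++ PySem.List.slice t (some (i + 1)) none,
      s * PySem.List.pyGetD S i 0)
    = pvComputeOneMore (t, s) i S := by
  obtain ⟨j, rfl⟩ : ∃ j : Nat, i = (j : Int) := ⟨i.toNat, (Int.toNat_of_nonneg h0).symm⟩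
  have hj : j < t.length := by exact_mod_cast hik
  simp only [pvComputeOneMore]
  rw [PySem.List.pySetD_of_nonneg _ _ h0, List.set_eq_take_append_cons_drop]
  have h1 : ((j : Int) + 1) = ((j + 1 : Nat) : Int) := by push_cast; ring
  rw [PySem.List.slice_to_natCast, h1, PySem.List.slice_from_natCast]
  simp [hj, PySem.List.pyGetD_of_nonneg _ _ h0]

theorem pv_step_eq (S : List Int) (k : Int) (cur : PySem.Set (List Int × Int))
    (hinv : ∀ x ∈ cur, x.1.length = k.toNat) :
    cur.foldl (fun acc prod =>
        (PySem.List.pyRange 0 k 1).foldl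
          (fun acc2 i => PySem.Set.add acc2 (pvComputeOneMore prod i S)) acc)
      PySem.Set.empty
    = pvStepAlt S k cur := by
  rw [pvStepAlt, PySem.Set.ofList_eq_foldl, List.foldl_flatMap]
  apply PySem.List.foldl_congr_mem
  intro acc x hx
  rw [List.foldl_map]
  apply PySem.List.foldl_congr_mem
  intro acc2 i hi
  rcases PySem.List.mem_pyRange_one.1 hi with ⟨h0, hik⟩
  have hl : (x.1.length : Int) = k := by
    rw [hinv x hx]; omega
  rw [← pv_elem_eq S x.1 x.2 i h0 (by omega)]

theorem pv_main (S : List Int) (k : Int) (m : Nat) :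
    pvRunSimulation S m k
    = (PySem.List.pyRange 0 (m : Int) 1).foldl (fun c _ => pvStepAlt S k c)
        (PySem.Set.add PySem.Set.empty (List.replicate k.toNat 0, 1)) := by
  induction m with
  | zero => simp [pvRunSimulation]
  | succ m ih =>
      have hr : PySem.List.pyRange 0 ((m : Int) + 1) 1
          = PySem.List.pyRange 0 (m : Int) 1 ++ [(m : Int)] :=
        PySem.List.pyRange_one_succ_right (by positivity)
      push_cast
      rw [hr, List.foldl_append, ← ih]
      simp only [List.foldl_cons, List.foldl_nil]
      rw [← pv_step_eq S k _ (pv_invariant S k m)]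
      rfl

-- ===== VERDICT (by name: the statement is the Claim_ definition above) =====
theorem function_simulation_spec : Claim_equal_function_simulation := by
  intro n k p _ hpre
  unfold Spec_function_simulation function_simulation function_simulation_alt
  have hn : n = ((n.toNat : Nat) : Int) := (Int.toNat_of_nonneg hpre).symm
  rw [hn]
  simp only [Int.toNat_natCast]
  exact congrArg PySem.Set.len (pv_main _ k n.toNat)
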